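-- pv_equiv track=rewrite | github.com/dtcolligan/garmin_lab | src/health_agent_infra/core/review/summary.py | _intensity_distribution
-- ===== SOURCE A (Python) =====
-- from typing import Any, Iterable, Optional
--
-- def _intensity_distribution(
--     outcomes: Iterable[dict[str, Any]],
-- ) -> dict[str, int]:
--     """Count outcomes by ``intensity_delta`` ordinal label."""
--
--     distribution: dict[str, int] = {
--         "much_lighter": 0,
--         "lighter": 0,
--         "same": 0,
--         "harder": 0,
--         "much_harder": 0,
--     }
--     for outcome in outcomes:
--         label = outcome.get("intensity_delta")
--         if label in distribution:
--             distribution[label] += 1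
--     return distribution
-- ===== SOURCE B (Python) =====
-- from typing import Any, Iterable
--
-- _LABELS = ("much_lighter", "lighter", "same", "harder", "much_harder")
--
-- def _intensity_distribution(
--     outcomes: Iterable[dict[str, Any]],
-- ) -> dict[str, int]:
--     """Count outcomes by ``intensity_delta`` ordinal label."""
--     mats = list(outcomes)
--     return {
--         label: sum(1 for o in mats if o.get("intensity_delta") == label)
--         for label in _LABELS
--     }
-- ===== Notes on version B (the rewrite author's own statement) =====
-- stated objective: alternative
-- what changed: Replaces the single-pass dictionary of incrementing counters with a per-label counting scan: the result dict is built by iterating over the five fixed labels and counting matching outcomes for each.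
import Mathlib
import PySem

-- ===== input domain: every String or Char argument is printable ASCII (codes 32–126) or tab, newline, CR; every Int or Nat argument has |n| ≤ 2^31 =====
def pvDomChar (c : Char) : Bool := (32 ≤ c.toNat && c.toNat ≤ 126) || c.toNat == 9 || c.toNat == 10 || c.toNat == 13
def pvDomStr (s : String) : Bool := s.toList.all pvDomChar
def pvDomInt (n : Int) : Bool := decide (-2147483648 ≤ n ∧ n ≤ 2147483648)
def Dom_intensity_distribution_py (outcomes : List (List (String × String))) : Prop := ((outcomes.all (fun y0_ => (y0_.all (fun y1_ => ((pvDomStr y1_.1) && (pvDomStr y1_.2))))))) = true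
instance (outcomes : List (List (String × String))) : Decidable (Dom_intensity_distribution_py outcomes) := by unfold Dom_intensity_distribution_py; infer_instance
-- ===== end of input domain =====

-- B builds the five-key result by counting matching outcomes per fixed label instead of A's single-pass incrementing dictionary; objective: alternative.


-- ===== PORT A =====
-- loop body of A: label = outcome.get("intensity_delta"); if label in distribution: distribution[label] += 1
def pvStepA (dist : PySem.Dict String Int) (outcome : List (String × String)) : PySem.Dict String Int :=
  match (PySem.Dict.mk outcome).get? "intensity_delta" with
  | some l => if dist.contains l then dist.modify l 0 (· + 1) else dist
  | none => dist

def intensity_distribution_py (outcomes : List (List (String × String))) : List (String × Int) :=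
  (outcomes.foldl pvStepA
    (PySem.Dict.mk [("much_lighter", 0), ("lighter", 0), ("same", 0), ("harder", 0), ("much_harder", 0)])).items

-- ===== PORT B =====
def pvLabels : List String := ["much_lighter", "lighter", "same", "harder", "much_harder"]

def intensity_distribution_py_alt (outcomes : List (List (String × String))) : List (String × Int) :=
  pvLabels.map (fun label =>
    (label, (outcomes.countP (fun o => (PySem.Dict.mk o).get? "intensity_delta" == some label) : Int)))

-- ===== PRECONDITION & SPEC =====
def Spec_intensity_distribution_py (outcomes : List (List (String × String))) (out : List (String × Int)) : Prop := out = intensity_distribution_py_alt outcomes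
instance (outcomes : List (List (String × String))) (out : List (String × Int)) : Decidable (Spec_intensity_distribution_py outcomes out) := by unfold Spec_intensity_distribution_py; infer_instance

-- ===== CLAIM (what is proved, stated in full; the proofs are below) =====
def Claim_equal_intensity_distribution_py : Prop := ∀ (outcomes : List (List (String × String))), Dom_intensity_distribution_py outcomes → Spec_intensity_distribution_py outcomes (intensity_distribution_py outcomes)

-- ===== LEMMAS AND PROOFS =====
def pvCnt (outcomes : List (List (String × String))) (label : String) : Int :=
  (outcomes.countP (fun o => (PySem.Dict.mk o).get? "intensity_delta" == some label) : Int)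

lemma pvFoldA_eq (outcomes : List (List (String × String))) (a b c d e : Int) :
    outcomes.foldl pvStepA
      (PySem.Dict.mk [("much_lighter", a), ("lighter", b), ("same", c), ("harder", d), ("much_harder", e)])
    = PySem.Dict.mk [("much_lighter", a + pvCnt outcomes "much_lighter"),
                     ("lighter", b + pvCnt outcomes "lighter"),
                     ("same", c + pvCnt outcomes "same"),
                     ("harder", d + pvCnt outcomes "harder"),
                     ("much_harder", e + pvCnt outcomes "much_harder")] := by
  induction outcomes generalizing a b c d e with
  | nil => simp [pvCnt]
  | cons o rest ih =>
    simp only [List.foldl_cons]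
    have hcnt : ∀ l, pvCnt (o :: rest) l
        = (if (PySem.Dict.mk o).get? "intensity_delta" == some l then 1 else 0) + pvCnt rest l := by
      intro l
      simp only [pvCnt, List.countP_cons]
      split <;> (simp_all; try omega)
    rcases hg : (PySem.Dict.mk o).get? "intensity_delta" with _ | l
    · have hstep : pvStepA (PySem.Dict.mk [("much_lighter", a), ("lighter", b), ("same", c), ("harder", d), ("much_harder", e)]) o
          = PySem.Dict.mk [("much_lighter", a), ("lighter", b), ("same", c), ("harder", d), ("much_harder", e)] := by
        simp only [pvStepA, hg]
      rw [hstep, ih]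
      simp only [hcnt, hg]
      simp
    · by_cases h1 : l = "much_lighter"
      · subst h1
        have hstep : pvStepA (PySem.Dict.mk [("much_lighter", a), ("lighter", b), ("same", c), ("harder", d), ("much_harder", e)]) o = PySem.Dict.mk [("much_lighter", a + 1), ("lighter", b), ("same", c), ("harder", d), ("much_harder", e)] := by
          simp only [pvStepA, hg]
          simp [PySem.Dict.contains, PySem.Dict.modify, PySem.Dict.insert, PySem.Dict.getD,
            PySem.Dict.get?, List.find?]
        rw [hstep, ih]
        simp only [hcnt, hg]
        simp
        all_goals omega
      · by_cases h2 : l = "lighter"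
        · subst h2
          have hstep : pvStepA (PySem.Dict.mk [("much_lighter", a), ("lighter", b), ("same", c), ("harder", d), ("much_harder", e)]) o = PySem.Dict.mk [("much_lighter", a), ("lighter", b + 1), ("same", c), ("harder", d), ("much_harder", e)] := by
            simp only [pvStepA, hg]
            simp [PySem.Dict.contains, PySem.Dict.modify, PySem.Dict.insert, PySem.Dict.getD,
              PySem.Dict.get?, List.find?]
          rw [hstep, ih]
          simp only [hcnt, hg]
          simp
          all_goals omega
        · by_cases h3 : l = "same"
          · subst h3
            have hstep : pvStepA (PySem.Dict.mk [("much_lighter", a), ("lighter", b), ("same", c), ("harder", d), ("much_harder", e)]) o = PySem.Dict.mk [("much_lighter", a), ("lighter", b), ("same", c + 1), ("harder", d), ("much_harder", e)] := by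
              simp only [pvStepA, hg]
              simp [PySem.Dict.contains, PySem.Dict.modify, PySem.Dict.insert, PySem.Dict.getD,
                PySem.Dict.get?, List.find?]
            rw [hstep, ih]
            simp only [hcnt, hg]
            simp
            all_goals omega
          · by_cases h4 : l = "harder"
            · subst h4
              have hstep : pvStepA (PySem.Dict.mk [("much_lighter", a), ("lighter", b), ("same", c), ("harder", d), ("much_harder", e)]) o = PySem.Dict.mk [("much_lighter", a), ("lighter", b), ("same", c), ("harder", d + 1), ("much_harder", e)] := by
                simp only [pvStepA, hg]
                simp [PySem.Dict.contains, PySem.Dict.modify, PySem.Dict.insert, PySem.Dict.getD,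
                  PySem.Dict.get?, List.find?]
              rw [hstep, ih]
              simp only [hcnt, hg]
              simp
              all_goals omega
            · by_cases h5 : l = "much_harder"
              · subst h5
                have hstep : pvStepA (PySem.Dict.mk [("much_lighter", a), ("lighter", b), ("same", c), ("harder", d), ("much_harder", e)]) o = PySem.Dict.mk [("much_lighter", a), ("lighter", b), ("same", c), ("harder", d), ("much_harder", e + 1)] := by
                  simp only [pvStepA, hg]
                  simp [PySem.Dict.contains, PySem.Dict.modify, PySem.Dict.insert, PySem.Dict.getD,
                    PySem.Dict.get?, List.find?]
                rw [hstep, ih]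
                simp only [hcnt, hg]
                simp
                all_goals omega
              · have hstep : pvStepA (PySem.Dict.mk [("much_lighter", a), ("lighter", b), ("same", c), ("harder", d), ("much_harder", e)]) o
                    = PySem.Dict.mk [("much_lighter", a), ("lighter", b), ("same", c), ("harder", d), ("much_harder", e)] := by
                  simp only [pvStepA, hg]
                  rw [if_neg]
                  simp [PySem.Dict.contains]
                  exact ⟨fun h => h1 h.symm, fun h => h2 h.symm, fun h => h3 h.symm,
                    fun h => h4 h.symm, fun h => h5 h.symm⟩
                rw [hstep, ih]
                simp only [hcnt, hg]
                simp [h1, h2, h3, h4, h5]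

-- ===== VERDICT (by name: the statement is the Claim_ definition above) =====
theorem intensity_distribution_py_spec : Claim_equal_intensity_distribution_py := by
  intro outcomes _
  show _ = _
  simp only [intensity_distribution_py, intensity_distribution_py_alt, pvLabels]
  rw [pvFoldA_eq]
  simp [pvCnt]
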